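-- pv_equiv track=rewrite | github.com/Mikelenjilo/LCS-Optimization-using-genetic-algorithm | genetic_algorithm/helper_functions.py | calculate_m
-- ===== SOURCE A (Python) =====
-- def calculate_m(sub_seq: str, sequences: list[str]) -> int:
--     counter: int = 0
--     for seq in sequences:
--         i: int = 0
--         j: int = 0
--         k: int = 0
--
--         while i < len(sub_seq) and j < len(seq):
--             if sub_seq[i] == seq[j]:
--                 i += 1
--                 j += 1
--                 k += 1
--             else:
--                 j += 1
--
--         if k == len(sub_seq):
--             counter += 1
--
--     return counter
-- ===== SOURCE B (Python) =====
-- def calculate_m(sub_seq: str, sequences: list[str]) -> int: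
--     def index(seq: str) -> dict:
--         pos = {}
--         for idx, ch in enumerate(seq):
--             pos.setdefault(ch, []).append(idx)
--         return pos
--
--     def matches(pos: dict, sub: str) -> bool:
--         cur = 0
--         for ch in sub:
--             lst = pos.get(ch)
--             if lst is None:
--                 return False
--             p = next((q for q in lst if q >= cur), None)
--             if p is None:
--                 return False
--             cur = p + 1
--         return True
--
--     return sum(1 for seq in sequences if matches(index(seq), sub_seq))
-- ===== Notes on version B (the rewrite author's own statement) =====
-- stated objective: alternative
-- what changed: Instead of A's two-pointer character-by-character scan of each sequence, B first builds a per-character position index (dict char -> sorted list of indices) for each sequence and then matches sub_seq by repeatedly looking up the first recorded position at or after the current cursor, counting matches with a generator sum.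
import Mathlib
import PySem

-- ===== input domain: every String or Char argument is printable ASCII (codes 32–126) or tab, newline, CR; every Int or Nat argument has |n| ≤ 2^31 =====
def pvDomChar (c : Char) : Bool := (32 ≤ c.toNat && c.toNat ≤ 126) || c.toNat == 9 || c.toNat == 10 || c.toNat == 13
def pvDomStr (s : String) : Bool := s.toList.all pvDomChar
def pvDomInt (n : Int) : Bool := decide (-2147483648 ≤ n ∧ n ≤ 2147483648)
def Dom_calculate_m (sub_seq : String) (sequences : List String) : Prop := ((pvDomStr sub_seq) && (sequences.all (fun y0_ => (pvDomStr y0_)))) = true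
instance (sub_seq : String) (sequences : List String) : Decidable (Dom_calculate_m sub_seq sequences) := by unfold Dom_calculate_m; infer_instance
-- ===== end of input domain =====

-- B replaces A's per-sequence two-pointer scan by a per-character position index
-- (dict char -> list of indices) looked up with a first-position-at-or-after-cursor
-- search; an alternative algorithm of similar cost, no speed claim.

-- ===== PORT A =====
-- the while loop of A: indices i into sub, j into seq, matched count k
def calculate_m_loop (sub seq : List Char) (i j k : Nat) : Nat :=
  if _h : i < sub.length ∧ j < seq.length then
    if sub.getD i ' ' == seq.getD j ' ' then
      calculate_m_loop sub seq (i + 1) (j + 1) (k + 1)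
    else
      calculate_m_loop sub seq i (j + 1) k
  else k
termination_by seq.length - j

def calculate_m (sub_seq : String) (sequences : List String) : Int :=
  sequences.foldl (fun counter seq =>
    let k := calculate_m_loop sub_seq.toList seq.toList 0 0 0
    if k = sub_seq.toList.length then counter + 1 else counter) 0

-- ===== PORT B =====
-- index(seq): pos.setdefault(ch, []).append(idx) over enumerate(seq)
def calculate_m_index (seq : List Char) : PySem.Dict Char (List Int) :=
  (PySem.List.enumerate seq 0).foldl (fun d p => d.modify p.2 [] (· ++ [p.1])) PySem.Dict.empty

-- next((q for q in lst if q >= cur), None)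
def calculate_m_firstGE (lst : List Int) (cur : Int) : Option Int :=
  match lst with
  | [] => none
  | q :: qs => if cur ≤ q then some q else calculate_m_firstGE qs cur

-- matches(pos, sub): the for-loop with early return, as structural recursion over sub
def calculate_m_matches (pos : PySem.Dict Char (List Int)) : List Char → Int → Bool
  | [], _ => true
  | c :: cs, cur =>
    match pos.get? c with
    | none => false
    | some lst =>
      match calculate_m_firstGE lst cur with
      | none => false
      | some p => calculate_m_matches pos cs (p + 1)

def calculate_m_alt (sub_seq : String) (sequences : List String) : Int :=
  ((sequences.countP (fun seq =>
      calculate_m_matches (calculate_m_index seq.toList) sub_seq.toList 0) : Nat) : Int)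

-- ===== PRECONDITION & SPEC =====
def Spec_calculate_m (sub_seq : String) (sequences : List String) (out : Int) : Prop := out = calculate_m_alt sub_seq sequences
instance (sub_seq : String) (sequences : List String) (out : Int) : Decidable (Spec_calculate_m sub_seq sequences out) := by unfold Spec_calculate_m; infer_instance

-- ===== CLAIM (what is proved, stated in full; the proofs are below) =====
def Claim_equal_calculate_m : Prop := ∀ (sub_seq : String) (sequences : List String), Dom_calculate_m sub_seq sequences → Spec_calculate_m sub_seq sequences (calculate_m sub_seq sequences)

-- ===== LEMMAS AND PROOFS =====

-- greedy matched-prefix count on suffix lists (proof-only abstraction of A's loop)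
def pvGreedy : List Char → List Char → Nat
  | _, [] => 0
  | [], _ :: _ => 0
  | c :: cs, d :: ds => if c == d then pvGreedy cs ds + 1 else pvGreedy (c :: cs) ds

-- 'c in it' consuming search: rest of the list after the first occurrence of c
def pvFindDrop (c : Char) : List Char → Option (List Char)
  | [] => none
  | d :: ds => if c == d then some ds else pvFindDrop c ds

-- reference subsequence check on suffixes
def pvContains : List Char → List Char → Bool
  | [], _ => true
  | c :: cs, ds =>
    match pvFindDrop c ds with
    | none => false
    | some ds' => pvContains cs ds'

lemma pvGreedy_eq_iff (cs ds : List Char) :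
    pvGreedy cs ds = cs.length ↔ pvContains cs ds = true := by
  induction ds generalizing cs with
  | nil =>
    cases cs with
    | nil => simp [pvGreedy, pvContains]
    | cons c cs => simp [pvGreedy, pvContains, pvFindDrop]
  | cons d ds ih =>
    cases cs with
    | nil => simp [pvGreedy, pvContains]
    | cons c cs =>
      by_cases h : c == d
      · simp [pvGreedy, h, pvContains, pvFindDrop, ih]
      · have : pvContains (c :: cs) (d :: ds) = pvContains (c :: cs) ds := by
          simp [pvContains, pvFindDrop, h]
        rw [pvGreedy, if_neg (by simpa using h), this, ih]

lemma calculate_m_loop_eq (sub seq : List Char) (i j k : Nat) :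
    calculate_m_loop sub seq i j k = k + pvGreedy (sub.drop i) (seq.drop j) := by
  fun_induction calculate_m_loop sub seq i j k with
  | case1 i j k h heq ih =>
    rw [ih]
    rw [List.drop_eq_getElem_cons h.1, List.drop_eq_getElem_cons h.2]
    have hc : sub[i] == seq[j] := by
      simpa [List.getD, List.getElem?_eq_getElem h.1, List.getElem?_eq_getElem h.2] using heq
    simp [pvGreedy, hc]
    omega
  | case2 i j k h heq ih =>
    rw [ih]
    rw [List.drop_eq_getElem_cons h.2]
    have hi : i < sub.length := h.1
    rw [List.drop_eq_getElem_cons hi]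
    have hc : ¬ (sub[i] == seq[j]) := by
      simpa [List.getD, List.getElem?_eq_getElem hi, List.getElem?_eq_getElem h.2] using heq
    rw [pvGreedy, if_neg hc, ← List.drop_eq_getElem_cons hi]
  | case3 i j k h =>
    push Not at h
    rcases lt_or_ge i sub.length with hi | hi
    · have hj : seq.length ≤ j := h hi
      rw [List.drop_eq_nil_of_le hj]
      cases hs : List.drop i sub <;> simp [pvGreedy]
    · rw [List.drop_eq_nil_of_le hi]
      cases List.drop j seq <;> simp [pvGreedy]

-- positions (as Int, starting at n) of c in seq
def pvEPos (n : Nat) (seq : List Char) (c : Char) : List Int :=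
  match seq with
  | [] => []
  | d :: ds => (if d == c then [(n : Int)] else []) ++ pvEPos (n + 1) ds c

lemma pvEPos_cons_pos (n : Nat) (d : Char) (ds : List Char) (c : Char) (h : (d == c) = true) :
    pvEPos n (d :: ds) c = (n : Int) :: pvEPos (n + 1) ds c := by
  simp [pvEPos, h]

lemma pvEPos_cons_neg (n : Nat) (d : Char) (ds : List Char) (c : Char) (h : ¬ (d == c) = true) :
    pvEPos n (d :: ds) c = pvEPos (n + 1) ds c := by
  simp [pvEPos, h]

lemma pvEPos_ge (c : Char) (l : List Char) : ∀ (m : Nat) (x : Int), x ∈ pvEPos m l c → (m : Int) ≤ x := by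
  induction l with
  | nil => intro m x hx; simp [pvEPos] at hx
  | cons e es ihe =>
    intro m x hx
    simp only [pvEPos, List.mem_append] at hx
    rcases hx with hx | hx
    · rcases (by split at hx <;> simp_all : x = (m : Int)) with rfl; omega
    · have := ihe (m + 1) x hx; push_cast at this ⊢; omega

lemma pvFirstGE_low (l : List Int) (t t' : Int) (hall : ∀ x ∈ l, t' ≤ x) (ht : t ≤ t') :
    calculate_m_firstGE l t = calculate_m_firstGE l t' := by
  cases l with
  | nil => rfl
  | cons q qs =>
    have hq : t' ≤ q := hall q List.mem_cons_self
    simp only [calculate_m_firstGE]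
    rw [if_pos (by omega), if_pos hq]

lemma pvIndex_filter (seq : List Char) (c : Char) : ∀ n : Nat,
    ((PySem.List.enumerate seq (n : Int)).filter (fun p => p.2 == c)).map (·.1)
      = pvEPos n seq c := by
  induction seq with
  | nil => intro n; simp [PySem.List.enumerate_nil, pvEPos]
  | cons d ds ih =>
    intro n
    rw [PySem.List.enumerate_cons]
    by_cases h : d == c
    · have := ih (n + 1)
      push_cast at this
      simp [pvEPos, h, this]
    · have := ih (n + 1)
      push_cast at this
      simp [pvEPos, h, this]

lemma pvIndex_getD (seq : List Char) (c : Char) :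
    (calculate_m_index seq).getD c [] = pvEPos 0 seq c := by
  unfold calculate_m_index
  have hswap : ∀ (l : List (Int × Char)) (d : PySem.Dict Char (List Int)),
      l.foldl (fun d p => d.modify p.2 [] (· ++ [p.1])) d
        = (l.map (fun p => (p.2, p.1))).foldl (fun d p => d.modify p.1 [] (· ++ [p.2])) d := by
    intro l
    induction l with
    | nil => intro d; simp
    | cons p ps ih => intro d; simp [ih]
  rw [hswap, PySem.Dict.getD_foldl_modify_append]
  have : ((PySem.List.enumerate seq 0).map (fun p => (p.2, p.1))).filter (fun p => p.1 == c)
      = ((PySem.List.enumerate seq 0).filter (fun p => p.2 == c)).map (fun p => (p.2, p.1)) := by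
    rw [List.filter_map]; rfl
  rw [this]
  have h0 := pvIndex_filter seq c 0
  simp only [Nat.cast_zero] at h0
  simp [List.map_map, PySem.Dict.getD_empty]
  rw [← h0]
  rfl

-- the heart: firstGE on the position list vs the consuming search on the suffix
lemma pvFirstGE_spec (seq : List Char) (c : Char) : ∀ (cur n : Nat),
    (match calculate_m_firstGE (pvEPos n seq c) ((n + cur : Nat) : Int) with
     | none => pvFindDrop c (seq.drop cur) = none
     | some p => ∃ q : Nat, p = (q : Int) ∧ n + cur ≤ q ∧
         pvFindDrop c (seq.drop cur) = some (seq.drop (q - n + 1))) := by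
  induction seq with
  | nil => intro cur n; simp [pvEPos, calculate_m_firstGE, pvFindDrop]
  | cons d ds ih =>
    intro cur n
    cases cur with
    | zero =>
      by_cases h : d == c
      · have hc : c == d := by simpa [BEq.comm] using h
        rw [pvEPos_cons_pos n d ds c h]
        simp only [calculate_m_firstGE, Nat.add_zero]
        rw [if_pos (by omega)]
        exact ⟨n, rfl, by omega, by simp [pvFindDrop, hc]⟩
      · have hc : ¬ (c == d) = true := by simpa [BEq.comm] using h
        rw [pvEPos_cons_neg n d ds c h]
        have hbump : calculate_m_firstGE (pvEPos (n + 1) ds c) ((n + 0 : Nat) : Int)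
            = calculate_m_firstGE (pvEPos (n + 1) ds c) (((n + 1) + 0 : Nat) : Int) := by
          apply pvFirstGE_low
          · intro x hx
            have := pvEPos_ge c ds (n + 1) x hx
            push_cast at this ⊢; omega
          · push_cast; omega
        rw [hbump]
        have hstep := ih 0 (n + 1)
        revert hstep
        cases calculate_m_firstGE (pvEPos (n + 1) ds c) (((n + 1) + 0 : Nat) : Int) with
        | none =>
          intro hstep
          simp only [List.drop_zero] at hstep ⊢
          simp [pvFindDrop, hc, hstep]
        | some p =>
          rintro ⟨q, rfl, hq, hfind⟩
          refine ⟨q, rfl, by omega, ?_⟩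
          simp only [List.drop_zero] at hfind ⊢
          have h1 : (d :: ds).drop (q - n + 1) = ds.drop (q - (n + 1) + 1) := by
            have hm : q - n + 1 = (q - (n + 1) + 1) + 1 := by omega
            rw [hm, List.drop_succ_cons]
          rw [h1, ← hfind]
          simp [pvFindDrop, hc]
    | succ cur' =>
      have hskip : calculate_m_firstGE (pvEPos n (d :: ds) c) ((n + (cur' + 1) : Nat) : Int)
          = calculate_m_firstGE (pvEPos (n + 1) ds c) (((n + 1) + cur' : Nat) : Int) := by
        have harith : ((n + (cur' + 1) : Nat) : Int) = (((n + 1) + cur' : Nat) : Int) := by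
          push_cast; ring
        by_cases h : d == c
        · rw [pvEPos_cons_pos n d ds c h]
          simp only [calculate_m_firstGE]
          rw [if_neg (by push_cast; omega), harith]
        · rw [pvEPos_cons_neg n d ds c h, harith]
      rw [hskip, List.drop_succ_cons]
      have hstep := ih cur' (n + 1)
      revert hstep
      cases calculate_m_firstGE (pvEPos (n + 1) ds c) (((n + 1) + cur' : Nat) : Int) with
      | none => intro hstep; exact hstep
      | some p =>
        rintro ⟨q, rfl, hq, hfind⟩
        refine ⟨q, rfl, by omega, ?_⟩
        rw [hfind]
        have h1 : (d :: ds).drop (q - n + 1) = ds.drop (q - (n + 1) + 1) := by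
          have hm : q - n + 1 = (q - (n + 1) + 1) + 1 := by omega
          rw [hm, List.drop_succ_cons]
        rw [h1]

lemma pvMatches_eq (seq : List Char) (sub : List Char) : ∀ cur : Nat,
    calculate_m_matches (calculate_m_index seq) sub (cur : Int)
      = pvContains sub (seq.drop cur) := by
  induction sub with
  | nil => intro cur; simp [calculate_m_matches, pvContains]
  | cons c cs ih =>
    intro cur
    have hspec := pvFirstGE_spec seq c cur 0
    simp only [Nat.zero_add] at hspec
    have hgetD := pvIndex_getD seq c
    cases hget : (calculate_m_index seq).get? c with
    | none =>
      have hemp : pvEPos 0 seq c = [] := by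
        rw [← hgetD, PySem.Dict.getD_eq_get?_getD, hget]; rfl
      rw [hemp] at hspec
      simp only [calculate_m_firstGE] at hspec
      simp [calculate_m_matches, hget, pvContains, hspec]
    | some lst =>
      have hlst : lst = pvEPos 0 seq c := by
        rw [← hgetD, PySem.Dict.getD_eq_get?_getD, hget]; rfl
      simp only [calculate_m_matches, hget, hlst]
      cases hfg : calculate_m_firstGE (pvEPos 0 seq c) ((cur : Nat) : Int) with
      | none =>
        rw [hfg] at hspec
        simp only [] at hspec
        simp [pvContains, hspec]
      | some p =>
        rw [hfg] at hspec
        obtain ⟨q, rfl, hq, hfind⟩ := hspec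
        simp only []
        rw [pvContains, hfind]
        simp only [Nat.sub_zero]
        have hcast : ((q : Int) + 1) = ((q + 1 : Nat) : Int) := by push_cast; ring
        rw [hcast, ih (q + 1)]

lemma calculate_m_elem (sub seq : List Char) :
    (calculate_m_loop sub seq 0 0 0 = sub.length)
      ↔ calculate_m_matches (calculate_m_index seq) sub 0 = true := by
  rw [calculate_m_loop_eq]
  have := pvMatches_eq seq sub 0
  simp only [Nat.cast_zero, List.drop_zero] at this
  rw [this]
  simpa using pvGreedy_eq_iff sub seq

lemma calculate_m_fold (sub : String) (ss : List String) (c : Int) :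
    ss.foldl (fun counter seq =>
      let k := calculate_m_loop sub.toList seq.toList 0 0 0
      if k = sub.toList.length then counter + 1 else counter) c
    = c + ((ss.countP (fun seq =>
        calculate_m_matches (calculate_m_index seq.toList) sub.toList 0) : Nat) : Int) := by
  induction ss generalizing c with
  | nil => simp
  | cons s ss ih =>
    rw [List.foldl_cons, ih, List.countP_cons]
    by_cases h : calculate_m_matches (calculate_m_index s.toList) sub.toList 0 = true
    · rw [if_pos ((calculate_m_elem _ _).mpr h)]
      simp [h]; ring
    · rw [if_neg (fun hk => h ((calculate_m_elem _ _).mp hk))]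
      simp [h]

-- ===== VERDICT (by name: the statement is the Claim_ definition above) =====
theorem calculate_m_spec : Claim_equal_calculate_m := by
  intro sub_seq sequences _
  unfold Spec_calculate_m calculate_m calculate_m_alt
  simpa using calculate_m_fold sub_seq sequences 0
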